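-- pv_equiv track=rewrite | github.com/rosnFinite/audio-trigger | src/photron_raww/cihx_parser.py | get_tag_line_idx
-- ===== SOURCE A (Python) =====
-- from typing import List, Tuple
--
-- def get_tag_line_idx(lines: List[str], tag: str) -> List[Tuple[int, int]]:
--     """Returns a list of tuples containing opening and closing line indices for the provided tag.
--     The tag should be specified by its name (e.g., 'html') and not including '<' or '</>'.
--
--     Parameters
--     ----------
--     lines : List[str]
--         List of lines inside the file.
--     tag : str
--         The tag name for which to find opening and closing indices.
--
--     Returns
--     -------
--     List[Tuple[int, int]]
--         A list of tuples, each containing opening and closing line indices for the specified tag.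
--     """
--     opening_line = -1
--     tag_idx_list = []
--     for idx, line in enumerate(lines):
--         if f"<{tag}>" in line:
--             opening_line = idx
--         if f"</{tag}>" in line:
--             closing_line = idx
--             tag_idx_list.append((opening_line, closing_line))
--     return tag_idx_list
-- ===== SOURCE B (Python) =====
-- from typing import List, Tuple
--
-- def get_tag_line_idx(lines: List[str], tag: str) -> List[Tuple[int, int]]:
--     opening_tag = f"<{tag}>"
--     closing_tag = f"</{tag}>"
--     openings = [i for i, line in enumerate(lines) if opening_tag in line]
--     closings = [i for i, line in enumerate(lines) if closing_tag in line]
--     result = []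
--     last = -1
--     j = 0
--     for c in closings:
--         while j < len(openings) and openings[j] <= c:
--             last = openings[j]
--             j += 1
--         result.append((last, c))
--     return result
-- ===== Notes on version B (the rewrite author's own statement) =====
-- stated objective: alternative
-- what changed: A's single scan that carries the last opening index across lines is replaced by gathering all opening and closing line indices first and then pairing each closing with the last opening index not after it by a single two-pointer merge over the two index lists.
import Mathlib
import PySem

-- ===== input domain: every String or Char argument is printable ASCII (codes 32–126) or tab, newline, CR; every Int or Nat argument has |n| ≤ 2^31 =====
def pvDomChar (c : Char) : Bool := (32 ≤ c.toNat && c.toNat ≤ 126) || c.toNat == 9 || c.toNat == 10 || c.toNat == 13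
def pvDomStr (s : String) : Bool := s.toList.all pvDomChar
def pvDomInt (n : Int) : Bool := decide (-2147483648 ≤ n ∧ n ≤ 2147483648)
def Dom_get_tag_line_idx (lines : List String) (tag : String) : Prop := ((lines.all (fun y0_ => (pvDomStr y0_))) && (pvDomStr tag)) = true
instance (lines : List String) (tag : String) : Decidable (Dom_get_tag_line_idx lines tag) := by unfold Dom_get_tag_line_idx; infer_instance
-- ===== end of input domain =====

-- B replaces A's single carry-over-state scan by gather-all-indices-then-pair-by-merge (alternative decomposition, same cost).


-- ===== PORT A =====
-- the 'for idx, line in enumerate(lines)' loop, state = (opening_line, tag_idx_list)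
def pvA_loop (op cl : String) : List (Int × String) → Int → List (Int × Int) → List (Int × Int)
  | [], _, acc => acc
  | (idx, line) :: rest, opening, acc =>
    let opening' := if PySem.Str.isIn op line then idx else opening
    let acc' := if PySem.Str.isIn cl line then acc ++ [(opening', idx)] else acc
    pvA_loop op cl rest opening' acc'

def get_tag_line_idx (lines : List String) (tag : String) : List (Int × Int) :=
  pvA_loop ("<" ++ tag ++ ">") ("</" ++ tag ++ ">") (PySem.List.enumerate lines 0) (-1) []

-- ===== PORT B =====
-- [i for i, line in enumerate(lines) if needle in line]
def pvB_tagIdx (needle : String) (lines : List String) : List Int :=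
  (PySem.List.enumerate lines 0).filterMap
    (fun p => if PySem.Str.isIn needle p.2 then some p.1 else none)

-- the inner 'while j < len(openings) and openings[j] <= c' loop, state = (last, remaining openings)
def pvB_adv (c : Int) : Int → List Int → Int × List Int
  | last, [] => (last, [])
  | last, o :: os => if o ≤ c then pvB_adv c o os else (last, o :: os)

-- the 'for c in closings' loop
def pvB_merge : List Int → Int → List Int → List (Int × Int)
  | [], _, _ => []
  | c :: cs, last, os =>
    let s := pvB_adv c last os
    (s.1, c) :: pvB_merge cs s.1 s.2

def get_tag_line_idx_alt (lines : List String) (tag : String) : List (Int × Int) :=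
  pvB_merge (pvB_tagIdx ("</" ++ tag ++ ">") lines) (-1)
            (pvB_tagIdx ("<" ++ tag ++ ">") lines)

-- ===== PRECONDITION & SPEC =====
def Spec_get_tag_line_idx (lines : List String) (tag : String) (out : List (Int × Int)) : Prop := out = get_tag_line_idx_alt lines tag
instance (lines : List String) (tag : String) (out : List (Int × Int)) : Decidable (Spec_get_tag_line_idx lines tag out) := by unfold Spec_get_tag_line_idx; infer_instance

-- ===== CLAIM (what is proved, stated in full; the proofs are below) =====
def Claim_equal_get_tag_line_idx : Prop := ∀ (lines : List String) (tag : String), Dom_get_tag_line_idx lines tag → Spec_get_tag_line_idx lines tag (get_tag_line_idx lines tag)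

-- ===== LEMMAS AND PROOFS =====

-- the value both programs pair with a closing index c: the last gathered opening index ≤ c, default `last`
def pvPrev (last : Int) (os : List Int) (c : Int) : Int :=
  ((os.takeWhile (fun o => decide (o ≤ c))).getLast?).getD last

theorem pvTakeWhile_nil_of_all_neg {p : Int → Bool} {os : List Int}
    (h : ∀ x ∈ os, p x = false) : os.takeWhile p = [] := by
  cases os with
  | nil => rfl
  | cons o os => simp [h o (by simp)]

theorem pvPrev_of_all_gt {last c : Int} {os : List Int} (h : ∀ x ∈ os, c < x) :
    pvPrev last os c = last := by
  unfold pvPrev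
  rw [pvTakeWhile_nil_of_all_neg (fun x hx => by simp; exact h x hx)]
  rfl

theorem pvPrev_cons_le {last c o : Int} {os : List Int} (h : o ≤ c) :
    pvPrev last (o :: os) c = pvPrev o os c := by
  unfold pvPrev
  rw [List.takeWhile_cons_of_pos (by simpa using h), List.getLast?_cons]
  cases (os.takeWhile (fun x => decide (x ≤ c))).getLast? <;> rfl

theorem pvB_adv_eq (c last : Int) (os : List Int) :
    pvB_adv c last os = (pvPrev last os c, os.dropWhile (fun o => decide (o ≤ c))) := by
  induction os generalizing last with
  | nil => simp [pvB_adv, pvPrev]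
  | cons o os ih =>
    by_cases h : o ≤ c
    · rw [pvB_adv, if_pos h, ih, pvPrev_cons_le h, List.dropWhile_cons_of_pos (by simpa using h)]
    · rw [pvB_adv, if_neg h, List.dropWhile_cons_of_neg (by simpa using h)]
      unfold pvPrev
      rw [List.takeWhile_cons_of_neg (by simpa using h)]
      rfl

theorem pvPrev_shift (last c c' : Int) (os : List Int) (h : c ≤ c') :
    pvPrev last os c' = pvPrev (pvPrev last os c) (os.dropWhile (fun o => decide (o ≤ c))) c' := by
  conv_lhs => rw [← List.takeWhile_append_dropWhile (p := fun o => decide (o ≤ c)) (l := os)]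
  have hall : (os.takeWhile (fun o => decide (o ≤ c))).takeWhile (fun o => decide (o ≤ c')) =
      os.takeWhile (fun o => decide (o ≤ c)) := by
    rw [List.takeWhile_eq_self_iff]
    intro x hx
    have := List.mem_takeWhile_imp hx
    simp at this ⊢
    omega
  unfold pvPrev
  rw [List.takeWhile_append, hall, if_pos rfl, List.getLast?_append]
  cases ((os.dropWhile (fun o => decide (o ≤ c))).takeWhile (fun o => decide (o ≤ c'))).getLast? <;> rfl

theorem pvB_merge_eq (cs : List Int) :
    ∀ (last : Int) (os : List Int), List.Pairwise (· ≤ ·) cs →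
      pvB_merge cs last os = cs.map (fun c => (pvPrev last os c, c)) := by
  induction cs with
  | nil => intro _ _ _; rfl
  | cons c cs ih =>
    intro last os hpw
    obtain ⟨hhead, htail⟩ := List.pairwise_cons.mp hpw
    rw [pvB_merge, pvB_adv_eq, ih _ _ htail, List.map_cons]
    refine congrArg _ (List.map_congr_left ?_)
    intro c' hc'
    rw [← pvPrev_shift last c c' os (hhead c' hc')]

-- A-side: indices of lines containing `needle` (pvB_tagIdx over an explicit pair list)
def pvIdxs (needle : String) (ps : List (Int × String)) : List Int :=
  ps.filterMap (fun p => if PySem.Str.isIn needle p.2 then some p.1 else none)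

theorem pvIdxs_mem_gt {needle : String} {ps : List (Int × String)} {i : Int}
    (h : ∀ q ∈ ps, i < q.1) : ∀ x ∈ pvIdxs needle ps, i < x := by
  intro x hx
  simp only [pvIdxs, List.mem_filterMap] at hx
  obtain ⟨p, hp, hcond⟩ := hx
  split at hcond
  · cases hcond; exact h p hp
  · cases hcond

theorem pvA_loop_eq (op cl : String) (ps : List (Int × String)) :
    ∀ (last : Int) (acc : List (Int × Int)),
      List.Pairwise (fun p q : Int × String => p.1 < q.1) ps →
      pvA_loop op cl ps last acc =
        acc ++ (pvIdxs cl ps).map (fun c => (pvPrev last (pvIdxs op ps) c, c)) := by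
  induction ps with
  | nil => intro _ _ _; simp [pvA_loop, pvIdxs]
  | cons p ps ih =>
    intro last acc hpw
    obtain ⟨hhead, htail⟩ := List.pairwise_cons.mp hpw
    obtain ⟨i, line⟩ := p
    have hgt : ∀ x ∈ pvIdxs op ps, i < x := pvIdxs_mem_gt (fun q hq => hhead q hq)
    have hgtcl : ∀ x ∈ pvIdxs cl ps, i < x := pvIdxs_mem_gt (fun q hq => hhead q hq)
    rw [pvA_loop, ih _ _ htail]
    have hopen : pvIdxs op ((i, line) :: ps) =
        (if PySem.Str.isIn op line then i :: pvIdxs op ps else pvIdxs op ps) := by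
      by_cases h : PySem.Str.isIn op line = true
      · simp only [pvIdxs, List.filterMap_cons]; rw [if_pos h, if_pos h]
      · simp only [pvIdxs, List.filterMap_cons]; rw [if_neg h, if_neg h]
    have hclose : pvIdxs cl ((i, line) :: ps) =
        (if PySem.Str.isIn cl line then i :: pvIdxs cl ps else pvIdxs cl ps) := by
      by_cases h : PySem.Str.isIn cl line = true
      · simp only [pvIdxs, List.filterMap_cons]; rw [if_pos h, if_pos h]
      · simp only [pvIdxs, List.filterMap_cons]; rw [if_neg h, if_neg h]
    -- the new carried opening equals pvPrev over the extended opening list, at any c ≥ i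
    have hshift : ∀ c, i ≤ c →
        pvPrev last (pvIdxs op ((i, line) :: ps)) c =
        pvPrev (if PySem.Str.isIn op line then i else last) (pvIdxs op ps) c := by
      intro c hc
      rw [hopen]
      by_cases hop : PySem.Str.isIn op line
      · rw [if_pos hop, if_pos hop, pvPrev_cons_le hc]
      · rw [if_neg hop, if_neg hop]
    by_cases hcl : PySem.Str.isIn cl line = true
    · rw [if_pos hcl] at hclose
      simp only [if_pos hcl, hclose, List.map_cons]
      rw [hshift i le_rfl, pvPrev_of_all_gt hgt, List.append_assoc, List.singleton_append]
      refine congrArg _ (congrArg _ (List.map_congr_left ?_))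
      intro c hc
      rw [hshift c (le_of_lt (hgtcl c hc))]
    · rw [if_neg hcl] at hclose
      simp only [if_neg hcl, hclose]
      refine congrArg _ (List.map_congr_left ?_)
      intro c hc
      rw [hshift c (le_of_lt (hgtcl c hc))]

-- ===== VERDICT (by name: the statement is the Claim_ definition above) =====
theorem get_tag_line_idx_spec : Claim_equal_get_tag_line_idx := by
  intro lines tag _
  unfold Spec_get_tag_line_idx get_tag_line_idx get_tag_line_idx_alt
  have hA := pvA_loop_eq ("<" ++ tag ++ ">") ("</" ++ tag ++ ">")
      (PySem.List.enumerate lines 0) (-1) []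
      (PySem.List.pairwise_lt_enumerate lines 0)
  have hcsorted : List.Pairwise (· ≤ ·) (pvB_tagIdx ("</" ++ tag ++ ">") lines) := by
    unfold pvB_tagIdx
    rw [List.pairwise_filterMap]
    refine (PySem.List.pairwise_lt_enumerate lines 0).imp ?_
    intro a a' hlt b hb b' hb'
    split at hb <;> cases hb
    split at hb' <;> cases hb'
    exact le_of_lt hlt
  have hidx : ∀ n : String, pvB_tagIdx n lines = pvIdxs n (PySem.List.enumerate lines 0) :=
    fun _ => rfl
  rw [hA, pvB_merge_eq _ _ _ hcsorted, hidx, hidx, List.nil_append]
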